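-- pv_equiv track=rewrite | github.com/flaugusto/mc102 | others/test2.py | searchInRegion
-- ===== SOURCE A (Python) =====
-- sudoku = [
--     [5,3,0,0,7,0,0,0,0],
--     [6,0,0,1,9,5,0,0,0],
--     [0,9,8,0,0,0,0,6,0],
--     [8,0,0,0,6,0,0,0,3],
--     [4,0,0,8,0,3,0,0,1],
--     [7,0,0,0,2,0,0,0,6],
--     [0,6,0,0,0,0,2,8,0],
--     [0,0,0,4,1,9,0,0,5],
--     [0,0,0,0,8,0,0,7,9]
-- ]
--
-- def searchInRegion(num, i, j):
--         # Divide a matriz do sudoku em uma matriz 3x3 de matrizes 3x3 individuais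
--         divided = divide(sudoku)
--         # Retorna os indices da região que deve ser avaliada
--         regionLine = getRegionIndex(i)
--         regionCol = getRegionIndex(j)
--         # Retorna a matriz 3x3 da região que deve ser analisada
--         region = divided[regionLine][regionCol]
--         # Procura o número na matriz 3x3 da região
--         # True se encontra, False senão
--         for i in range(3):
--             for j in range(3):
--                 x = region[i][j]
--                 if x == 0 or x != num:
--                     continue
--                 else:
--                     return True
--         return False
--
-- def divide(sudoku):
--     r = []
--     step = 3
--     for z in range(3):
--         a,b,c = [],[],[]
--         for line in range(step - 3, step):
--             st, nd, rd = [], [], []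
--             for x in range(3):
--                 st.append(sudoku[line][x])
--             for x in range(3,6):
--                 nd.append(sudoku[line][x])
--             for x in range(6,9):
--                 rd.append(sudoku[line][x])
--             a.append(st)
--             b.append(nd)
--             c.append(rd)
--         l = [a,b,c]
--         r.append(l)
--         step += 3
--     return r
--
-- def getRegionIndex(index):
--     # Cria uma matriz que servirá de guia para localização da região a ser procurada
--     indexes = [
--         [0,1,2],
--         [3,4,5],
--         [6,7,8]
--     ]
--     # Baseado no indice da posicao recebido, retorna qual o indice da região correspondente
--     for i in range(3):
--         for j in range(3):
--             if indexes[i][j] == index: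
--                 # indice da região
--                 return i
-- ===== SOURCE B (Python) =====
-- sudoku = [
--     [5,3,0,0,7,0,0,0,0],
--     [6,0,0,1,9,5,0,0,0],
--     [0,9,8,0,0,0,0,6,0],
--     [8,0,0,0,6,0,0,0,3],
--     [4,0,0,8,0,3,0,0,1],
--     [7,0,0,0,2,0,0,0,6],
--     [0,6,0,0,0,0,2,8,0],
--     [0,0,0,4,1,9,0,0,5],
--     [0,0,0,0,8,0,0,7,9]
-- ]
--
-- def getRegionIndex(index):
--     # region row/col index; None for off-grid indices (as in A)
--     return index // 3 if 0 <= index <= 8 else None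
--
-- def searchInRegion(num, i, j):
--     ri = getRegionIndex(i) * 3
--     cj = getRegionIndex(j) * 3
--     for r in range(ri, ri + 3):
--         for c in range(cj, cj + 3):
--             if num != 0 and sudoku[r][c] == num:
--                 return True
--     return False
-- ===== Notes on version B (the rewrite author's own statement) =====
-- stated objective: simpler
-- what changed: B removes the divide() partition of the grid into a 3x3 matrix of 3x3 blocks and the 3x3 table-scan in getRegionIndex, computing the region's base offsets in closed form (index // 3, guarded to the 0..8 grid range) and scanning the nine cells directly in the global sudoku.
import Mathlib
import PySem

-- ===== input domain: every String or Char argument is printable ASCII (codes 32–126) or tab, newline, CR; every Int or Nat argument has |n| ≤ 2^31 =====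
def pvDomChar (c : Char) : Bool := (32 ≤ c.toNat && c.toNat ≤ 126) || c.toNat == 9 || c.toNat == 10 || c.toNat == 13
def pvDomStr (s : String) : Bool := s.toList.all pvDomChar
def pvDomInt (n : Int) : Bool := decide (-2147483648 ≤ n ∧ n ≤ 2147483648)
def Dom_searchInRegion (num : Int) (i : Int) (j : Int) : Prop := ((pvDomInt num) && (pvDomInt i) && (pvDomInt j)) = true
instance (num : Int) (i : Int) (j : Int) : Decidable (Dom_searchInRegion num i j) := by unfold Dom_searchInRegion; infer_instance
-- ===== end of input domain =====

-- B drops the divide() 3x3x3x3 partition and the table-scan getRegionIndex, indexing the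
-- global grid directly from closed-form region offsets; objective: simpler (same behaviour,
-- including raising off-grid — excluded by Pre_).

-- ===== PORT A =====
def pvSudoku : List (List Int) := [
  [5,3,0,0,7,0,0,0,0],
  [6,0,0,1,9,5,0,0,0],
  [0,9,8,0,0,0,0,6,0],
  [8,0,0,0,6,0,0,0,3],
  [4,0,0,8,0,3,0,0,1],
  [7,0,0,0,2,0,0,0,6],
  [0,6,0,0,0,0,2,8,0],
  [0,0,0,4,1,9,0,0,5],
  [0,0,0,0,8,0,0,7,9]]

-- literal transliteration of divide(sudoku): state = (r, step)
def pvDivide (s : List (List Int)) : List (List (List (List Int))) :=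
  ((PySem.List.pyRange 0 3 1).foldl (fun (st : List (List (List (List Int))) × Int) _z =>
    let r := st.1
    let step := st.2
    let abc := (PySem.List.pyRange (step - 3) step 1).foldl
      (fun (abc : List (List Int) × List (List Int) × List (List Int)) line =>
        let row := PySem.List.pyGetD s line []
        let stl := (PySem.List.pyRange 0 3 1).foldl (fun l x => l ++ [PySem.List.pyGetD row x 0]) []
        let ndl := (PySem.List.pyRange 3 6 1).foldl (fun l x => l ++ [PySem.List.pyGetD row x 0]) []
        let rdl := (PySem.List.pyRange 6 9 1).foldl (fun l x => l ++ [PySem.List.pyGetD row x 0]) []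
        (abc.1 ++ [stl], abc.2.1 ++ [ndl], abc.2.2 ++ [rdl]))
      ([], [], [])
    (r ++ [[abc.1, abc.2.1, abc.2.2]], step + 3)) ([], 3)).1

-- literal transliteration of getRegionIndex: scan the 3x3 index table, first match wins; none = Python's implicit None
def pvGetRegionIndex (index : Int) : Option Int :=
  let indexes : List (List Int) := [[0,1,2],[3,4,5],[6,7,8]]
  (PySem.List.pyRange 0 3 1).foldl (fun acc i =>
    match acc with
    | some _ => acc
    | none => (PySem.List.pyRange 0 3 1).foldl (fun acc2 j =>
        match acc2 with
        | some _ => acc2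
        | none =>
          if PySem.List.pyGetD (PySem.List.pyGetD indexes i []) j (-1) = index then some i else none)
        none) none

def searchInRegion (num : Int) (i : Int) (j : Int) : Bool :=
  let divided := pvDivide pvSudoku
  match pvGetRegionIndex i, pvGetRegionIndex j with
  | some rl, some rc =>
    let region := PySem.List.pyGetD (PySem.List.pyGetD divided rl []) rc []
    (PySem.List.pyRange 0 3 1).foldl (fun found ii =>
      found || (PySem.List.pyRange 0 3 1).foldl (fun f jj =>
        f || (let x := PySem.List.pyGetD (PySem.List.pyGetD region ii []) jj 0
              !(x == 0 || x != num))) false) false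
  | _, _ => false  -- Python raises TypeError here (None index); excluded by Pre_

-- ===== PORT B =====
def pvSudokuAlt : List (List Int) := [
  [5,3,0,0,7,0,0,0,0],
  [6,0,0,1,9,5,0,0,0],
  [0,9,8,0,0,0,0,6,0],
  [8,0,0,0,6,0,0,0,3],
  [4,0,0,8,0,3,0,0,1],
  [7,0,0,0,2,0,0,0,6],
  [0,6,0,0,0,0,2,8,0],
  [0,0,0,4,1,9,0,0,5],
  [0,0,0,0,8,0,0,7,9]]

def pvGetRegionIndexAlt (index : Int) : Option Int :=
  if 0 ≤ index ∧ index ≤ 8 then some (PySem.Int.floordiv index 3) else none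

def searchInRegion_alt (num : Int) (i : Int) (j : Int) : Bool :=
  match pvGetRegionIndexAlt i with
  | none => false  -- Python raises TypeError here (None * 3); excluded by Pre_
  | some rl =>
  match pvGetRegionIndexAlt j with
  | none => false  -- Python raises TypeError here (None * 3); excluded by Pre_
  | some rc =>
    let ri := rl * 3
    let cj := rc * 3
    (PySem.List.pyRange ri (ri + 3) 1).foldl (fun found r =>
      found || (PySem.List.pyRange cj (cj + 3) 1).foldl (fun f c =>
        f || (num != 0 && PySem.List.pyGetD (PySem.List.pyGetD pvSudokuAlt r []) c 0 == num)) false) false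

-- ===== PRECONDITION & SPEC =====
-- Pre_ excludes off-grid i or j, on which A raises TypeError (getRegionIndex returns None).
def Pre_searchInRegion (num : Int) (i : Int) (j : Int) : Prop :=
  0 ≤ i ∧ i ≤ 8 ∧ 0 ≤ j ∧ j ≤ 8
instance (num : Int) (i : Int) (j : Int) : Decidable (Pre_searchInRegion num i j) := by
  unfold Pre_searchInRegion; infer_instance
def pvWitness_searchInRegion : Int × Int × Int := (5, 0, 0)

def Spec_searchInRegion (num : Int) (i : Int) (j : Int) (out : Bool) : Prop := out = searchInRegion_alt num i j
instance (num : Int) (i : Int) (j : Int) (out : Bool) : Decidable (Spec_searchInRegion num i j out) := by unfold Spec_searchInRegion; infer_instance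

-- ===== CLAIM (what is proved, stated in full; the proofs are below) =====
def Claim_equal_searchInRegion : Prop := ∀ (num : Int) (i : Int) (j : Int), Dom_searchInRegion num i j → Pre_searchInRegion num i j → Spec_searchInRegion num i j (searchInRegion num i j)

-- ===== LEMMAS AND PROOFS =====

-- `divide(sudoku)` evaluated once, as a literal (used to rewrite port A's closed subterm)
def pvDivided : List (List (List (List Int))) :=
  [[[[5, 3, 0], [6, 0, 0], [0, 9, 8]], [[0, 7, 0], [1, 9, 5], [0, 0, 0]],
    [[0, 0, 0], [0, 0, 0], [0, 6, 0]]],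
   [[[8, 0, 0], [4, 0, 0], [7, 0, 0]], [[0, 6, 0], [8, 0, 3], [0, 2, 0]],
    [[0, 0, 3], [0, 0, 1], [0, 0, 6]]],
   [[[0, 6, 0], [0, 0, 0], [0, 0, 0]], [[0, 0, 0], [4, 1, 9], [0, 8, 0]],
    [[2, 8, 0], [0, 0, 5], [0, 7, 9]]]]

theorem pvDivide_eval : pvDivide pvSudoku = pvDivided := by decide

theorem pvGetRegionIndex_eval :
    ∀ k ∈ Finset.Icc (0 : Int) 8, pvGetRegionIndex k = some (PySem.Int.floordiv k 3) := by
  decide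

theorem pvGetRegionIndexAlt_eval :
    ∀ k ∈ Finset.Icc (0 : Int) 8, pvGetRegionIndexAlt k = some (PySem.Int.floordiv k 3) := by
  decide

theorem pvFloordiv3_cases :
    ∀ k ∈ Finset.Icc (0 : Int) 8,
      PySem.Int.floordiv k 3 = 0 ∨ PySem.Int.floordiv k 3 = 1 ∨ PySem.Int.floordiv k 3 = 2 := by
  decide

-- ===== VERDICT (by name: the statement is the Claim_ definition above) =====
set_option maxHeartbeats 2000000 in
theorem searchInRegion_spec : Claim_equal_searchInRegion := by
  intro num i j _ hpre
  unfold Spec_searchInRegion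
  obtain ⟨hi0, hi8, hj0, hj8⟩ := hpre
  have hi : i ∈ Finset.Icc (0 : Int) 8 := by simp [Finset.mem_Icc]; omega
  have hj : j ∈ Finset.Icc (0 : Int) 8 := by simp [Finset.mem_Icc]; omega
  simp only [searchInRegion, searchInRegion_alt, pvDivide_eval,
    pvGetRegionIndex_eval i hi, pvGetRegionIndex_eval j hj,
    pvGetRegionIndexAlt_eval i hi, pvGetRegionIndexAlt_eval j hj]
  rw [Bool.eq_iff_iff]
  rcases pvFloordiv3_cases i hi with h1 | h1 | h1 <;>
    rcases pvFloordiv3_cases j hj with h2 | h2 | h2 <;>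
    rw [h1, h2] <;>
    rcases eq_or_ne num 0 with h | h <;>
    simp [pvDivided, pvSudoku, pvSudokuAlt, PySem.List.pyRange, PySem.List.pyGetD, PySem.List.pyGet?,
      PySem.List.pyIdx?, List.range_succ, h] <;> tauto
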